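-- pv_equiv track=rewrite | github.com/mohit-shrma/bioinfotools | biPartitePlot/GEXFWriter.py | getAllNodesStringFromCluster
-- ===== SOURCE A (Python) =====
-- class GEXFWriterConstants:
--     #distance between left/ref and right/query nodes
--     REF_QUERY_DIST = 500
--
--     #distance between two separate blocks of left/right nodes
--     REF_QUERY_BLOCK_DIST = 500
--
--     #vertical distance between two y nodes
--     Y_OFFSET = 100
--
--     #MAX Y OFFSET
--     MAX_Y_OFFSET = 45000
--
-- def getNodeString(nodeLabel, nodeId, x, y, classType=''):
--     return "<node id=\""+ nodeId + "\" label=\"" + nodeLabel +"\">\n"\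
--         + '<viz:position x="' + str(x) +'" y="' + str(y) +'" z="0.0"/>'\
--         + "<attvalues>\n<attvalue for=\"0\" value=\"" + classType + "\"/>\n</attvalues>"\
--         + "\n</node>"
--
-- def getYnClusterString(nodeCluster, refX, refY, queryX, queryY):
--     clusterNodes = []
--     [refOrderList, queryOrderList, intersectionCount] = nodeCluster
--
--     #add ref nodes
--     for refNode in refOrderList:
--         clusterNodes.append(getNodeString(refNode, refNode, refX, refY, 'ref'))
--         refY += GEXFWriterConstants.Y_OFFSET
--
--     #add query nodes
--     for queryNode in queryOrderList:
--         clusterNodes.append(getNodeString(queryNode, queryNode, queryX, queryY, 'query'))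
--         queryY += GEXFWriterConstants.Y_OFFSET
--
--     return refY, queryY, '\n'.join(clusterNodes)
--
-- def getAllNodesStringFromCluster(nodeClusters):
--     allNodes = []
--
--     refX = 0
--     refY = 0
--
--     queryX = refX + GEXFWriterConstants.REF_QUERY_DIST
--     queryY = 0
--
--     for  nodeCluster in nodeClusters:
--         #lay out refnodes of cluster
--         refY, queryY, clusterNodesString = getYnClusterString(nodeCluster,\
--                                                                   refX, refY,\
--                                                                   queryX, queryY)
--         if refY > GEXFWriterConstants.MAX_Y_OFFSET \
--                 or queryY > GEXFWriterConstants.MAX_Y_OFFSET: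
--             #either Y exceeds max offset limit
--             #reset refY, refX, queryY, queryX to new block location
--             refX = refX + GEXFWriterConstants.REF_QUERY_DIST + \
--                 GEXFWriterConstants.REF_QUERY_BLOCK_DIST
--             refY = 0
--
--             queryX = refX + GEXFWriterConstants.REF_QUERY_DIST
--             queryY = 0
--
--             #relayout cluster with new coordinates
--             refY, queryY, clusterNodesString = getYnClusterString(nodeCluster,\
--                                                                       refX, refY,\
--                                                                       queryX, queryY)
--         allNodes.append(clusterNodesString)
--
--     return '\n'.join(allNodes)
-- ===== SOURCE B (Python) =====
-- class GEXFWriterConstants: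
--     REF_QUERY_DIST = 500
--     REF_QUERY_BLOCK_DIST = 500
--     Y_OFFSET = 100
--     MAX_Y_OFFSET = 45000
--
-- def getNodeString(nodeLabel, nodeId, x, y, classType=''):
--     return "<node id=\""+ nodeId + "\" label=\"" + nodeLabel +"\">\n"\
--         + '<viz:position x="' + str(x) +'" y="' + str(y) +'" z="0.0"/>'\
--         + "<attvalues>\n<attvalue for=\"0\" value=\"" + classType + "\"/>\n</attvalues>"\
--         + "\n</node>"
--
-- def getAllNodesStringFromCluster(nodeClusters):
--     # test-then-lay-out-once: predict each cluster's end offsets, reset the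
--     # block coordinates first if needed, then emit every node string directly
--     # at its closed-form position refY + i*Y_OFFSET (no relayout pass).
--     Y = GEXFWriterConstants.Y_OFFSET
--     blocks = []
--     refX, refY, queryY = 0, 0, 0
--     for refOrderList, queryOrderList, _ in nodeClusters:
--         if refY + len(refOrderList) * Y > GEXFWriterConstants.MAX_Y_OFFSET \
--                 or queryY + len(queryOrderList) * Y > GEXFWriterConstants.MAX_Y_OFFSET:
--             refX = refX + GEXFWriterConstants.REF_QUERY_DIST + GEXFWriterConstants.REF_QUERY_BLOCK_DIST
--             refY = 0
--             queryY = 0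
--         queryX = refX + GEXFWriterConstants.REF_QUERY_DIST
--         parts = [getNodeString(n, n, refX, refY + i * Y, 'ref')
--                  for i, n in enumerate(refOrderList)]
--         parts += [getNodeString(n, n, queryX, queryY + i * Y, 'query')
--                   for i, n in enumerate(queryOrderList)]
--         blocks.append('\n'.join(parts))
--         refY += len(refOrderList) * Y
--         queryY += len(queryOrderList) * Y
--     return '\n'.join(blocks)
-- ===== Notes on version B (the rewrite author's own statement) =====
-- stated objective: alternative
-- what changed: Replaces A's lay-out-then-test-then-relayout loop (which lays out an overflowing cluster twice) with a test-then-lay-out-once pass that predicts the end offsets as count*Y_OFFSET, resets the block coordinates first, and emits each node at its closed-form position refY + i*Y_OFFSET via enumerate.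
import Mathlib
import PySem

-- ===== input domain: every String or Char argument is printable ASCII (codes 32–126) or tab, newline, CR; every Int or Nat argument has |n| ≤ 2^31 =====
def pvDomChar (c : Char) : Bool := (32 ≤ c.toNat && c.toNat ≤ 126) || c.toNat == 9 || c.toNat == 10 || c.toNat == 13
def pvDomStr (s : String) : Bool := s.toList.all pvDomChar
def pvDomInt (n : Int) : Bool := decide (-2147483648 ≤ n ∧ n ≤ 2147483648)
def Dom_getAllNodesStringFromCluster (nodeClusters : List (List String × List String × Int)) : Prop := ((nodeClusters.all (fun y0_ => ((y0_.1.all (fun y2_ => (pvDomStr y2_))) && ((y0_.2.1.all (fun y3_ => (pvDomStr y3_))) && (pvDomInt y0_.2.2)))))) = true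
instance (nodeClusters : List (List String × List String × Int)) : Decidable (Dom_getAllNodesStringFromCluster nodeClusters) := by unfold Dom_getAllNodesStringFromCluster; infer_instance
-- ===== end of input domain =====

-- B replaces A's lay-out-then-test-then-relayout loop with a test-then-lay-out-once pass
-- (predicted end offsets, closed-form node positions): an alternative decomposition, same strings.

-- ===== PORT A =====
def getNodeString (nodeLabel nodeId : String) (x y : Int) (classType : String) : String :=
  "<node id=\"" ++ nodeId ++ "\" label=\"" ++ nodeLabel ++ "\">\n"
    ++ "<viz:position x=\"" ++ PySem.Int.toStr x ++ "\" y=\"" ++ PySem.Int.toStr y ++ "\" z=\"0.0\"/>"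
    ++ "<attvalues>\n<attvalue for=\"0\" value=\"" ++ classType ++ "\"/>\n</attvalues>"
    ++ "\n</node>"

def getYnClusterString (nodeCluster : List String × List String × Int)
    (refX refY queryX queryY : Int) : Int × Int × String :=
  let s1 := nodeCluster.1.foldl
      (fun (p : Int × List String) refNode =>
        (p.1 + 100, p.2 ++ [getNodeString refNode refNode refX p.1 "ref"]))
      (refY, ([] : List String))
  let s2 := nodeCluster.2.1.foldl
      (fun (p : Int × List String) queryNode =>
        (p.1 + 100, p.2 ++ [getNodeString queryNode queryNode queryX p.1 "query"]))
      (queryY, s1.2)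
  (s1.1, s2.1, PySem.Str.join "\n" s2.2)

def pvStepA (s : Int × Int × Int × Int × List String)
    (nodeCluster : List String × List String × Int) : Int × Int × Int × Int × List String :=
  let r := getYnClusterString nodeCluster s.1 s.2.1 s.2.2.1 s.2.2.2.1
  if r.1 > 45000 || r.2.1 > 45000 then
    let refX := s.1 + 500 + 500
    let queryX := refX + 500
    let r' := getYnClusterString nodeCluster refX 0 queryX 0
    (refX, r'.1, queryX, r'.2.1, s.2.2.2.2 ++ [r'.2.2])
  else
    (s.1, r.1, s.2.2.1, r.2.1, s.2.2.2.2 ++ [r.2.2])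

def getAllNodesStringFromCluster (nodeClusters : List (List String × List String × Int)) : String :=
  PySem.Str.join "\n" (nodeClusters.foldl pvStepA (0, 0, 0 + 500, 0, [])).2.2.2.2

-- ===== PORT B =====
def pvStepB (s : Int × Int × Int × List String)
    (c : List String × List String × Int) : Int × Int × Int × List String :=
  let st := if s.2.1 + (c.1.length : Int) * 100 > 45000
               || s.2.2.1 + (c.2.1.length : Int) * 100 > 45000
            then (s.1 + 500 + 500, (0 : Int), (0 : Int))
            else (s.1, s.2.1, s.2.2.1)
  let queryX := st.1 + 500
  let parts := (PySem.List.enumerate c.1).map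
                 (fun p => getNodeString p.2 p.2 st.1 (st.2.1 + p.1 * 100) "ref")
            ++ (PySem.List.enumerate c.2.1).map
                 (fun p => getNodeString p.2 p.2 queryX (st.2.2 + p.1 * 100) "query")
  (st.1, st.2.1 + (c.1.length : Int) * 100, st.2.2 + (c.2.1.length : Int) * 100,
   s.2.2.2 ++ [PySem.Str.join "\n" parts])

def getAllNodesStringFromCluster_alt (nodeClusters : List (List String × List String × Int)) : String :=
  PySem.Str.join "\n" (nodeClusters.foldl pvStepB (0, 0, 0, [])).2.2.2

-- ===== PRECONDITION & SPEC =====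
def Spec_getAllNodesStringFromCluster (nodeClusters : List (List String × List String × Int)) (out : String) : Prop := out = getAllNodesStringFromCluster_alt nodeClusters
instance (nodeClusters : List (List String × List String × Int)) (out : String) : Decidable (Spec_getAllNodesStringFromCluster nodeClusters out) := by unfold Spec_getAllNodesStringFromCluster; infer_instance

-- ===== CLAIM (what is proved, stated in full; the proofs are below) =====
def Claim_equal_getAllNodesStringFromCluster : Prop := ∀ (nodeClusters : List (List String × List String × Int)), Dom_getAllNodesStringFromCluster nodeClusters → Spec_getAllNodesStringFromCluster nodeClusters (getAllNodesStringFromCluster nodeClusters)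

-- ===== LEMMAS AND PROOFS =====

-- The per-class layout fold of A equals its closed form over enumerate (general start index s).
theorem foldNodes_eq (ct : String) (x : Int) :
    ∀ (l : List String) (y : Int) (acc : List String) (s : Int),
    l.foldl (fun (p : Int × List String) n =>
        (p.1 + 100, p.2 ++ [getNodeString n n x p.1 ct])) (y, acc)
      = (y + (l.length : Int) * 100,
         acc ++ (PySem.List.enumerate l s).map
           (fun p => getNodeString p.2 p.2 x (y + (p.1 - s) * 100) ct)) := by
  intro l
  induction l with
  | nil => intro y acc s; simp
  | cons a t ih =>
    intro y acc s
    simp only [List.foldl_cons, PySem.List.enumerate_cons, List.map_cons,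
      ih (y + 100) _ (s + 1), List.length_cons]
    have hm : ((PySem.List.enumerate t (s + 1)).map
          (fun p => getNodeString p.2 p.2 x (y + 100 + (p.1 - (s + 1)) * 100) ct))
        = ((PySem.List.enumerate t (s + 1)).map
          (fun p => getNodeString p.2 p.2 x (y + (p.1 - s) * 100) ct)) := by
      apply List.map_congr_left; intro p _
      rw [show y + 100 + (p.1 - (s + 1)) * 100 = y + (p.1 - s) * 100 from by ring]
    rw [hm, show y + (s - s) * 100 = y from by ring]
    refine Prod.ext ?_ ?_
    · push_cast; ring
    · simp

theorem foldNodes_eq0 (ct : String) (x : Int) (l : List String) (y : Int) (acc : List String) :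
    l.foldl (fun (p : Int × List String) n =>
        (p.1 + 100, p.2 ++ [getNodeString n n x p.1 ct])) (y, acc)
      = (y + (l.length : Int) * 100,
         acc ++ (PySem.List.enumerate l).map
           (fun p => getNodeString p.2 p.2 x (y + p.1 * 100) ct)) := by
  rw [foldNodes_eq ct x l y acc 0]
  have hm : ((PySem.List.enumerate l 0).map
        (fun p => getNodeString p.2 p.2 x (y + (p.1 - 0) * 100) ct))
      = ((PySem.List.enumerate l 0).map
        (fun p => getNodeString p.2 p.2 x (y + p.1 * 100) ct)) := by
    apply List.map_congr_left; intro p _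
    rw [show y + (p.1 - 0) * 100 = y + p.1 * 100 from by ring]
  rw [hm]

theorem getYn_eq (c : List String × List String × Int) (refX refY queryX queryY : Int) :
    getYnClusterString c refX refY queryX queryY
      = (refY + (c.1.length : Int) * 100, queryY + (c.2.1.length : Int) * 100,
         PySem.Str.join "\n"
           ((PySem.List.enumerate c.1).map
              (fun p => getNodeString p.2 p.2 refX (refY + p.1 * 100) "ref")
          ++ (PySem.List.enumerate c.2.1).map
              (fun p => getNodeString p.2 p.2 queryX (queryY + p.1 * 100) "query"))) := by
  simp [getYnClusterString, foldNodes_eq0]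

-- Loop invariant: with queryX = refX + 500 and equal accumulated strings, the two folds agree.
theorem main_aux :
    ∀ (cs : List (List String × List String × Int)) (refX refY queryX queryY : Int)
      (acc : List String), queryX = refX + 500 →
    (cs.foldl pvStepA (refX, refY, queryX, queryY, acc)).2.2.2.2
      = (cs.foldl pvStepB (refX, refY, queryY, acc)).2.2.2 := by
  intro cs
  induction cs with
  | nil => intro refX refY queryX queryY acc hq; simp
  | cons c t ih =>
    intro refX refY queryX queryY acc hq
    subst hq
    simp only [List.foldl_cons, pvStepA, pvStepB, getYn_eq]
    by_cases h : (45000 < refY + (c.1.length : Int) * 100 ∨ 45000 < queryY + (c.2.1.length : Int) * 100)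
    · rw [if_pos (by simpa using h), if_pos (by simpa using h)]
      exact ih _ _ _ _ _ rfl
    · rw [if_neg (by simpa using h), if_neg (by simpa using h)]
      exact ih _ _ _ _ _ rfl

-- ===== VERDICT (by name: the statement is the Claim_ definition above) =====
theorem getAllNodesStringFromCluster_spec : Claim_equal_getAllNodesStringFromCluster := by
  intro nodeClusters _
  unfold Spec_getAllNodesStringFromCluster getAllNodesStringFromCluster getAllNodesStringFromCluster_alt
  exact congrArg (PySem.Str.join "\n") (main_aux nodeClusters 0 0 (0 + 500) 0 [] rfl)
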